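-- pv_equiv track=rewrite | github.com/NREL/foundational-industry-energy-data | nei/nei_EF_calculations.py | match_partial
-- ===== SOURCE A (Python) =====
-- def match_partial(full_list, partial_list):
--     """
--     The NEI file point_678910.csv contains truncated values for
--     unit types and calculation methods. This method creates a dictionary
--     that has approximate matches to each set of values based on the
--     point_12345.csv file. These are approximate matches because the
--     truncated values may have multiple matches (e.g., 'S/L/T Emis' matches
--     'S/L/T Emission Factor (no Control Efficiency used)' and
--     'S/L/T Emission Factor (pre-control) plus Control Efficiency'.
--
--     Parameters
--     ----------
--     full_list : list of str
--         List of complete unit types or calculation methods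
--
--     partial_list : list of str
--         List of truncated unit types or calculation methods
--
--     Returns
--     -------
--     matching_dict : dictionary of str
--         Dictionary of {partial: match}.
--
--     """
--
--     matching_dict = {}
--
--     for k in partial_list:
--         len_k = len(k)
--         matches = [k == v[0:len_k] for v in full_list]
--         m_index = [i for i, val in enumerate(matches) if val]
--
--         try:
--             full = full_list[m_index[0]]  # use first match
--
--         except IndexError:
--             continue
--
--         else:
--             if full == k:
--                 continue
--
--             else:
--                 matching_dict[k] = full
--
--     return matching_dict
-- ===== SOURCE B (Python) =====
-- def match_partial(full_list, partial_list):
--     # Precompute: every prefix of every full string -> first full string having it.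
--     prefix_first = {}
--     for v in full_list:
--         for n in range(len(v) + 1):
--             prefix_first.setdefault(v[:n], v)
--     matching_dict = {}
--     for k in partial_list:
--         full = prefix_first.get(k)
--         if full is not None and full != k:
--             matching_dict[k] = full
--     return matching_dict
-- ===== Notes on version B (the rewrite author's own statement) =====
-- stated objective: faster
-- what changed: Instead of scanning full_list for a prefix match once per partial string, B precomputes one dict mapping every prefix of every full string to the first full string carrying it, then answers each partial with a single O(L) dict lookup.
import Mathlib
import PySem

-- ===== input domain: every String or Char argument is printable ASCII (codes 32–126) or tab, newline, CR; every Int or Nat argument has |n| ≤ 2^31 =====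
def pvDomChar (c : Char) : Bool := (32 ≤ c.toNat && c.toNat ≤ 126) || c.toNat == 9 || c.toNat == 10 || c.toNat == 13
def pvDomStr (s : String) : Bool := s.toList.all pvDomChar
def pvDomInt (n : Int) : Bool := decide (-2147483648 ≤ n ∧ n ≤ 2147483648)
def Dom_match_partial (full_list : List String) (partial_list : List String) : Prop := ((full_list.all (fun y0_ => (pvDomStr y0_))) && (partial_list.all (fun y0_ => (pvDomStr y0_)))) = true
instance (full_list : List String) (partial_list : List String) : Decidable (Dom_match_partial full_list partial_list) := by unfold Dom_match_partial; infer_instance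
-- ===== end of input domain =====

-- B replaces A's per-partial scan of full_list with a precomputed dict mapping every
-- prefix of every full string to the first full string carrying it (objective: faster).

-- ===== PORT A =====
def match_partial (full_list : List String) (partial_list : List String) : List (String × String) :=
  (partial_list.foldl (fun md k =>
    let len_k : Int := PySem.Str.len k
    let matchesL : List Bool := full_list.map (fun v => k == PySem.Str.slice v (some 0) (some len_k))
    let m_index : List Int := (PySem.List.enumerate matchesL).filterMap (fun p => if p.2 then some p.1 else none)
    match PySem.List.pyGet? m_index 0 with
    | none => md                                  -- IndexError → continue
    | some i =>
      match PySem.List.pyGet? full_list i with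
      | none => md                                -- unreachable: i is a valid index of full_list
      | some full => if full == k then md else PySem.Dict.insert md k full)
    PySem.Dict.empty).items

-- ===== PORT B =====
def prefix_first (full_list : List String) : PySem.Dict String String :=
  full_list.foldl (fun d v =>
    (PySem.List.pyRange 0 (PySem.Str.len v + 1) 1).foldl (fun d n =>
      PySem.Dict.setdefault d (PySem.Str.slice v (some 0) (some n)) v) d)
    PySem.Dict.empty

def match_partial_alt (full_list : List String) (partial_list : List String) : List (String × String) :=
  let pd := prefix_first full_list
  (partial_list.foldl (fun md k =>
    match PySem.Dict.get? pd k with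
    | none => md
    | some full => if full == k then md else PySem.Dict.insert md k full)
    PySem.Dict.empty).items

-- ===== PRECONDITION & SPEC =====
def Spec_match_partial (full_list : List String) (partial_list : List String) (out : List (String × String)) : Prop := out = match_partial_alt full_list partial_list
instance (full_list : List String) (partial_list : List String) (out : List (String × String)) : Decidable (Spec_match_partial full_list partial_list out) := by unfold Spec_match_partial; infer_instance

-- ===== CLAIM (what is proved, stated in full; the proofs are below) =====
def Claim_equal_match_partial : Prop := ∀ (full_list : List String) (partial_list : List String), Dom_match_partial full_list partial_list → Spec_match_partial full_list partial_list (match_partial full_list partial_list)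

-- ===== LEMMAS AND PROOFS =====

-- the match predicate both sides use: k equals the first len(k) characters of v
def pvPred (k v : String) : Bool := k == PySem.Str.slice v (some 0) (some (PySem.Str.len k))

theorem pvFoldlExt {α β : Type} (f g : α → β → α) (h : ∀ a b, f a b = g a b)
    (init : α) (l : List β) : l.foldl f init = l.foldl g init := by
  have hfg : f = g := funext fun a => funext fun b => h a b
  rw [hfg]

theorem pvSliceChar (v : String) (n : Int) (hn : 0 ≤ n) :
    (PySem.Str.slice v (some 0) (some n)).toList = v.toList.take n.toNat := by
  simp [PySem.Str.slice]
  exact PySem.List.slice_to v.toList hn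

theorem pvPred_iff (k v : String) :
    pvPred k v = true ↔ k.toList = v.toList.take k.toList.length := by
  rw [pvPred, beq_iff_eq, ← String.toList_inj,
    pvSliceChar v (PySem.Str.len k) (by rw [PySem.Str.len_eq]; exact Int.natCast_nonneg _),
    PySem.Str.len_eq, Int.toNat_natCast]

-- first-match index machinery of A computes List.findIdx?
theorem pvIdxHead (k : String) : ∀ (fl : List String) (s : Int),
    ((PySem.List.enumerate (fl.map (pvPred k)) s).filterMap
        (fun p => if p.2 then some p.1 else none)).head?
      = (fl.findIdx? (pvPred k)).map (fun j => s + (j : Int)) := by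
  intro fl
  induction fl with
  | nil => intro s; simp [PySem.List.enumerate_nil]
  | cons v fl ih =>
    intro s
    rw [List.map_cons, PySem.List.enumerate_cons, List.filterMap_cons, List.findIdx?_cons]
    by_cases hp : pvPred k v = true
    · simp [hp]
    · simp only [hp, Bool.false_eq_true, if_false]
      rw [ih (s + 1)]
      cases hf : fl.findIdx? (pvPred k) with
      | none => simp
      | some j => simp; ring

-- indexing at findIdx? computes List.find?
theorem pvFindIdxElem {α : Type} (p : α → Bool) : ∀ (l : List α),
    (match l.findIdx? p with | none => none | some j => l[j]?) = l.find? p := by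
  intro l
  induction l with
  | nil => simp
  | cons x l ih =>
    rw [List.findIdx?_cons, List.find?_cons]
    by_cases hp : p x = true
    · simp [hp]
    · simp only [hp, Bool.false_eq_true, if_false]
      rw [← ih]
      cases hf : l.findIdx? p with
      | none => simp
      | some j => simp

-- A's whole first-match computation is List.find?
theorem pvFindA (k : String) (fl : List String) :
    (match PySem.List.pyGet?
        ((PySem.List.enumerate (fl.map (pvPred k))).filterMap
          (fun p => if p.2 then some p.1 else none)) 0 with
      | none => (none : Option String)
      | some i => PySem.List.pyGet? fl i)
      = fl.find? (pvPred k) := by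
  rw [PySem.List.pyGet?_zero, ← List.head?_eq_getElem?, pvIdxHead k fl 0,
    ← pvFindIdxElem (pvPred k) fl]
  cases hf : fl.findIdx? (pvPred k) with
  | none => rfl
  | some j => simp

-- A's loop body equals the find?-shaped step
theorem pvStep (fl : List String) (k : String) (md : PySem.Dict String String) :
    (match PySem.List.pyGet?
        ((PySem.List.enumerate (fl.map (pvPred k))).filterMap
          (fun p => if p.2 then some p.1 else none)) 0 with
      | none => md
      | some i =>
        match PySem.List.pyGet? fl i with
        | none => md
        | some full => if full == k then md else PySem.Dict.insert md k full)
      = match fl.find? (pvPred k) with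
        | none => md
        | some full => if full == k then md else PySem.Dict.insert md k full := by
  rw [← pvFindA k fl]
  split
  · rfl
  · rfl

-- B-side: one inner setdefault loop, over an arbitrary list of slice positions
theorem pvInner (k v : String) : ∀ (ns : List Int) (d : PySem.Dict String String),
    (ns.foldl (fun d n => PySem.Dict.setdefault d (PySem.Str.slice v (some 0) (some n)) v) d).get? k
      = match d.get? k with
        | some x => some x
        | none => if ns.any (fun n => k == PySem.Str.slice v (some 0) (some n)) then some v else none := by
  intro ns
  induction ns with
  | nil => intro d; cases hd : d.get? k <;> simp [hd]
  | cons n ns ih =>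
    intro d
    rw [List.foldl_cons, ih]
    by_cases hc : d.contains (PySem.Str.slice v (some 0) (some n)) = true
    · rw [PySem.Dict.setdefault_of_contains d v hc]
      cases hd : d.get? k with
      | some x => rfl
      | none =>
        have hne : (k == PySem.Str.slice v (some 0) (some n)) = false := by
          apply beq_eq_false_iff_ne.mpr
          intro hkey
          rw [hkey] at hd
          rw [PySem.Dict.get?_eq_none_iff_contains] at hd
          rw [hd] at hc
          exact Bool.false_ne_true hc
        simp [List.any_cons, hne]
    · rw [PySem.Dict.setdefault_of_not_contains d v (Bool.not_eq_true _ ▸ hc)]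
      by_cases hk : k = PySem.Str.slice v (some 0) (some n)
      · have hdk : d.get? (PySem.Str.slice v (some 0) (some n)) = none := by
          rw [PySem.Dict.get?_eq_none_iff_contains]
          exact Bool.not_eq_true _ ▸ hc
        simp [hk, hdk, List.any_cons]
      · simp [PySem.Dict.get?_insert, hk, List.any_cons]

-- the range of slice positions hits k iff k is a prefix of v, i.e. pvPred
theorem pvAnyRange (k v : String) :
    ((PySem.List.pyRange 0 (PySem.Str.len v + 1) 1).any
        (fun n => k == PySem.Str.slice v (some 0) (some n))) = pvPred k v := by
  rw [Bool.eq_iff_iff]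
  simp only [List.any_eq_true, PySem.List.mem_pyRange_one, pvPred_iff]
  constructor
  · rintro ⟨n, ⟨h0, _⟩, heq⟩
    rw [beq_iff_eq, ← String.toList_inj, pvSliceChar v n h0] at heq
    rw [heq, List.length_take]
    rcases le_total n.toNat v.toList.length with h | h
    · rw [min_eq_left h]
    · rw [min_eq_right h, List.take_length]
      exact List.take_of_length_le h
  · intro heq
    refine ⟨(k.toList.length : Int), ⟨Int.natCast_nonneg _, ?_⟩, ?_⟩
    · have hlen := congrArg List.length heq
      rw [List.length_take] at hlen
      rw [PySem.Str.len_eq]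
      have : k.toList.length ≤ v.toList.length := by omega
      omega
    · rw [beq_iff_eq, ← String.toList_inj, pvSliceChar v _ (Int.natCast_nonneg _), Int.toNat_natCast]
      exact heq

-- B-side: the whole prefix-dict build, looked up at k, is List.find?
theorem pvOuter (k : String) : ∀ (fl : List String) (d : PySem.Dict String String),
    ((fl.foldl (fun d v =>
        (PySem.List.pyRange 0 (PySem.Str.len v + 1) 1).foldl (fun d n =>
          PySem.Dict.setdefault d (PySem.Str.slice v (some 0) (some n)) v) d)
      d).get? k)
      = match d.get? k with
        | some x => some x
        | none => fl.find? (pvPred k) := by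
  intro fl
  induction fl with
  | nil => intro d; cases hd : d.get? k <;> simp [hd]
  | cons v fl ih =>
    intro d
    rw [List.foldl_cons, ih, pvInner k v, pvAnyRange, List.find?_cons]
    cases hd : d.get? k with
    | some x => simp
    | none => by_cases hp : pvPred k v = true <;> simp [hp]

theorem pvFindB (k : String) (fl : List String) :
    (prefix_first fl).get? k = fl.find? (pvPred k) := by
  unfold prefix_first
  rw [pvOuter k fl PySem.Dict.empty]
  simp

-- ===== VERDICT (by name: the statement is the Claim_ definition above) =====
theorem match_partial_spec : Claim_equal_match_partial := by
  intro fl pl _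
  show match_partial fl pl = match_partial_alt fl pl
  unfold match_partial match_partial_alt
  refine congrArg PySem.Dict.items (pvFoldlExt _ _ (fun md k => ?_) _ _)
  exact (pvStep fl k md).trans
    (congrArg (fun o => match o with
      | none => md
      | some full => if full == k then md else PySem.Dict.insert md k full)
      (pvFindB k fl)).symm
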